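-- pv_equiv track=rewrite | github.com/cmkwong/EntNet | MemeryNet/lib/graph.py | translate_paths_into_dict_list
-- ===== SOURCE A (Python) =====
-- def translate_paths_into_dict_list(raw_paths):
--     """
--     self.raw_paths = {  0: '> LogSoftmaxBackward > TBackward > MmBackward > ViewBackward > AccumulateGrad > R',
--                         1: '> LogSoftmaxBackward > TBackward > MmBackward > SigmoidBackward > AddBackward0 > MmBackward > ViewBackward > AccumulateGrad > K',
--                         ...}
--     :return: path_dict = {  'R': ['> LogSoftmaxBackward > TBackward > MmBackward > ViewBackward > AccumulateGrad > R', '> MmBackward > ViewBackward > AccumulateGrad > R', ... ],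
--                             'K': '> LogSoftmaxBackward > TBackward > MmBackward > SigmoidBackward > AddBackward0 > MmBackward > ViewBackward > AccumulateGrad > K', ' > MmBackward > ViewBackward > AccumulateGrad > K', ...],
--                             'H': ...
--                             ...}
--              path_statistic = { 'R': 32,
--                                 'K': 219,
--                                 'H': ...}
--     """
--     path_statistic = {}
--     path_dict = {}
--     for _, text_path in raw_paths.items():
--         key = text_path.split('>')[-1].strip()
--         if key in path_dict:
--             path_dict[key].append(text_path)
--             path_statistic[key] += 1
--         else:
--             path_dict[key] = []
--             path_dict[key].append(text_path)
--             path_statistic[key] = 1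
--     return path_dict, path_statistic
-- ===== SOURCE B (Python) =====
-- def translate_paths_into_dict_list(raw_paths):
--     # Dict-free two-phase grouping: tag each path with its trailing key, collect the
--     # distinct keys in first-appearance order, then build each group by filtering.
--     keyed = [(p.split('>')[-1].strip(), p) for p in raw_paths.values()]
--     seen = []
--     for k, _ in keyed:
--         if k not in seen:
--             seen.append(k)
--     path_dict = {k: [p for kk, p in keyed if kk == k] for k in seen}
--     path_statistic = {k: sum(1 for kk, _ in keyed if kk == k) for k in seen}
--     return path_dict, path_statistic
-- ===== Notes on version B (the rewrite author's own statement) =====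
-- stated objective: alternative
-- what changed: B replaces A's incremental dict-building loop by a dict-free two-phase algorithm: it tags every path with its trailing key, collects the distinct keys in first-appearance order, and then builds each group (and its count) by filtering the tagged list per key.
import Mathlib
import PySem

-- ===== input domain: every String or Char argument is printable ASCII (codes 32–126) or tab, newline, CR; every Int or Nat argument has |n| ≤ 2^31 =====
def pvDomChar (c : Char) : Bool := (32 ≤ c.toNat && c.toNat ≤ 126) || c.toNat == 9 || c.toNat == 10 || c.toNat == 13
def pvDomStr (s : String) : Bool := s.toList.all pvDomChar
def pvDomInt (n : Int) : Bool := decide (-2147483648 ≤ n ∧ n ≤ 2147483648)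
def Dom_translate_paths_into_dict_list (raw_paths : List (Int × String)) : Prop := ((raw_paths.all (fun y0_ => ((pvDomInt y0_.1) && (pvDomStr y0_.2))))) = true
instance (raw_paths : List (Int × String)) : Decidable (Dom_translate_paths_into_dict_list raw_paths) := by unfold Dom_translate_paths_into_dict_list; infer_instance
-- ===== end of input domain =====

-- B is a dict-free two-phase algorithm: tag each path with its trailing key, collect the
-- distinct keys in first-appearance order, then build each group and count by filtering.

-- key = text_path.split('>')[-1].strip()   (shared key extraction; '>' is a nonempty
-- separator, so split? always returns some nonempty list and the [-1] never raises)
def pvKey (s : String) : String :=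
  PySem.Str.strip (PySem.List.pyGetD ((PySem.Str.split? s ">").getD []) (-1) "")

-- ===== PORT A =====
def pvStepA (st : PySem.Dict String (List String) × PySem.Dict String Int)
    (p : Int × String) : PySem.Dict String (List String) × PySem.Dict String Int :=
  let key := pvKey p.2
  if st.1.contains key then
    (st.1.modify key [] (· ++ [p.2]), st.2.modify key 0 (· + 1))
  else
    ((st.1.insert key []).modify key [] (· ++ [p.2]), st.2.insert key 1)

def translate_paths_into_dict_list (raw_paths : List (Int × String)) :
    (List (String × List String)) × (List (String × Int)) :=
  let st := raw_paths.foldl pvStepA (PySem.Dict.empty, PySem.Dict.empty)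
  (st.1.items, st.2.items)

-- ===== PORT B =====
def translate_paths_into_dict_list_alt (raw_paths : List (Int × String)) :
    (List (String × List String)) × (List (String × Int)) :=
  let keyed := raw_paths.map (fun p => (pvKey p.2, p.2))
  let seen := keyed.foldl (fun acc q => if acc.contains q.1 then acc else acc ++ [q.1]) ([] : List String)
  (seen.map (fun k => (k, (keyed.filter (fun q => q.1 == k)).map Prod.snd)),
   seen.map (fun k => (k, (keyed.countP (fun q => q.1 == k) : Int))))

-- ===== PRECONDITION & SPEC =====
def Spec_translate_paths_into_dict_list (raw_paths : List (Int × String)) (out : (List (String × List String)) × (List (String × Int))) : Prop := out = translate_paths_into_dict_list_alt raw_paths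
instance (raw_paths : List (Int × String)) (out : (List (String × List String)) × (List (String × Int))) : Decidable (Spec_translate_paths_into_dict_list raw_paths out) := by unfold Spec_translate_paths_into_dict_list; infer_instance

-- ===== CLAIM =====
def Claim_equal_translate_paths_into_dict_list : Prop := ∀ (raw_paths : List (Int × String)), Dom_translate_paths_into_dict_list raw_paths → Spec_translate_paths_into_dict_list raw_paths (translate_paths_into_dict_list raw_paths)

-- ===== LEMMAS AND PROOFS =====

-- the distinct keys of a tagged list, in first-appearance order (B's 'seen' fold)
def pvSeen (kd : List (String × String)) : List String :=
  kd.foldl (fun acc q => if acc.contains q.1 then acc else acc ++ [q.1]) []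

theorem pvSeen_mem_aux (kd : List (String × String)) :
    ∀ (acc : List String) (k : String),
    k ∈ kd.foldl (fun acc q => if acc.contains q.1 then acc else acc ++ [q.1]) acc ↔
      k ∈ acc ∨ k ∈ kd.map Prod.fst := by
  induction kd with
  | nil => intro acc k; simp
  | cons q t ih =>
    intro acc k
    simp only [List.foldl_cons, List.map_cons, List.mem_cons]
    by_cases h : acc.contains q.1 = true
    · rw [if_pos h, ih]
      constructor
      · rintro (h1 | h1)
        · exact Or.inl h1
        · exact Or.inr (Or.inr h1)
      · rintro (h1 | h1 | h1)
        · exact Or.inl h1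
        · subst h1; exact Or.inl (by simpa using h)
        · exact Or.inr h1
    · rw [if_neg h, ih]
      simp only [List.mem_append, List.mem_singleton]
      tauto
  -- closes both goals

theorem pvSeen_nodup_aux (kd : List (String × String)) :
    ∀ (acc : List String), acc.Nodup →
    (kd.foldl (fun acc q => if acc.contains q.1 then acc else acc ++ [q.1]) acc).Nodup := by
  induction kd with
  | nil => intro acc h; exact h
  | cons q t ih =>
    intro acc h
    simp only [List.foldl_cons]
    by_cases hc : acc.contains q.1 = true
    · rw [if_pos hc]; exact ih acc h
    · rw [if_neg hc]
      apply ih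
      rw [List.nodup_append]
      refine ⟨h, List.nodup_singleton _, ?_⟩
      intro a ha b hb e
      rw [List.mem_singleton] at hb
      exact hc (by subst hb; subst e; simpa using ha)

theorem pvSeen_mem (kd : List (String × String)) (k : String) :
    k ∈ pvSeen kd ↔ k ∈ kd.map Prod.fst := by
  unfold pvSeen; rw [pvSeen_mem_aux]; simp

theorem pvSeen_nodup (kd : List (String × String)) : (pvSeen kd).Nodup :=
  pvSeen_nodup_aux kd [] List.nodup_nil

theorem pvSeen_append_singleton (kd : List (String × String)) (q : String × String) :
    pvSeen (kd ++ [q]) =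
      if (pvSeen kd).contains q.1 then pvSeen kd else pvSeen kd ++ [q.1] := by
  unfold pvSeen; rw [List.foldl_append]; rfl

-- the B-side group and count for one key
def pvGroup (kd : List (String × String)) (k : String) : String × List String :=
  (k, (kd.filter (fun q => q.1 == k)).map Prod.snd)
def pvCount (kd : List (String × String)) (k : String) : String × Int :=
  (k, (kd.countP (fun q => q.1 == k) : Int))

-- loop invariant for A: after processing l, the two dicts are exactly B's per-key
-- groups/counts over the tagged list, listed in first-appearance key order
set_option maxHeartbeats 1600000 in
theorem pvLoopA (l : List (Int × String)) :
    (l.foldl pvStepA (PySem.Dict.empty, PySem.Dict.empty)).1.items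
        = (pvSeen (l.map (fun p => (pvKey p.2, p.2)))).map
            (pvGroup (l.map (fun p => (pvKey p.2, p.2)))) ∧
    (l.foldl pvStepA (PySem.Dict.empty, PySem.Dict.empty)).2.items
        = (pvSeen (l.map (fun p => (pvKey p.2, p.2)))).map
            (pvCount (l.map (fun p => (pvKey p.2, p.2)))) := by
  induction l using List.reverseRecOn with
  | nil => exact ⟨rfl, rfl⟩
  | append_singleton t p ih =>
    obtain ⟨ih1, ih2⟩ := ih
    set kd := t.map (fun p => (pvKey p.2, p.2)) with hkd
    set key := pvKey p.2 with hkey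
    have hmapkd : (t ++ [p]).map (fun p => (pvKey p.2, p.2)) = kd ++ [(key, p.2)] := by
      simp [hkd, hkey]
    set st := t.foldl pvStepA (PySem.Dict.empty, PySem.Dict.empty) with hst
    have hfold : (t ++ [p]).foldl pvStepA (PySem.Dict.empty, PySem.Dict.empty)
        = pvStepA st p := by rw [List.foldl_append]; rfl
    -- keys of the two dicts are pvSeen kd
    have hkeys1 : st.1.keys = pvSeen kd := by
      simp only [PySem.Dict.keys, ih1, List.map_map]
      exact List.map_congr_left (fun k _ => rfl) |>.trans (List.map_id _)
    have hkeys2 : st.2.keys = pvSeen kd := by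
      simp only [PySem.Dict.keys, ih2, List.map_map]
      exact List.map_congr_left (fun k _ => rfl) |>.trans (List.map_id _)
    have hnd1 : st.1.keys.Nodup := by rw [hkeys1]; exact pvSeen_nodup kd
    have hnd2 : st.2.keys.Nodup := by rw [hkeys2]; exact pvSeen_nodup kd
    -- filter over the extended list
    have hfilt : ∀ k, (kd ++ [(key, p.2)]).filter (fun q => q.1 == k)
        = kd.filter (fun q => q.1 == k) ++ (if key == k then [(key, p.2)] else []) := by
      intro k
      simp only [List.filter_append, List.filter_cons, List.filter_nil]
    have hcnt : ∀ k, (kd ++ [(key, p.2)]).countP (fun q => q.1 == k)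
        = kd.countP (fun q => q.1 == k) + (if key == k then 1 else 0) := by
      intro k
      simp only [List.countP_append, List.countP_cons, List.countP_nil]
      by_cases h : (key == k) = true <;> simp [h]
    by_cases hc : st.1.contains key = true
    · -- key already grouped
      have hmem : key ∈ pvSeen kd := by
        rw [← hkeys1, ← PySem.Dict.contains_iff_mem_keys]; exact hc
      have hseen' : pvSeen (kd ++ [(key, p.2)]) = pvSeen kd := by
        rw [pvSeen_append_singleton]; simp [hmem]
      have hc2 : st.2.contains key = true := by
        rw [PySem.Dict.contains_iff_mem_keys, hkeys2]; exact hmem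
      have hstep : pvStepA st p
          = (st.1.modify key [] (· ++ [p.2]), st.2.modify key 0 (· + 1)) := by
        simp [pvStepA, ← hkey, hc]
      have hg1 : st.1.getD key [] = (pvGroup kd key).2 := by
        apply PySem.Dict.getD_of_mem_items _ _ hnd1
        rw [ih1]; exact List.mem_map.mpr ⟨key, hmem, rfl⟩
      have hg2 : st.2.getD key 0 = (pvCount kd key).2 := by
        apply PySem.Dict.getD_of_mem_items _ _ hnd2
        rw [ih2]; exact List.mem_map.mpr ⟨key, hmem, rfl⟩
      rw [hfold, hstep, hmapkd]
      constructor
      · simp only [PySem.Dict.modify, hg1,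
          PySem.Dict.items_insert_of_contains _ _ hc, ih1, hseen', List.map_map]
        apply List.map_congr_left
        intro k _
        by_cases h : (k == key) = true
        · have : k = key := by simpa using h
          subst this
          simp [pvGroup, Function.comp, hfilt]
        · have hne : ¬ (key == k) = true := by
            simp only [beq_iff_eq] at h ⊢; exact fun e => h e.symm
          simp [pvGroup, Function.comp, h, hfilt, hne]
      · simp only [PySem.Dict.modify, hg2,
          PySem.Dict.items_insert_of_contains _ _ hc2, ih2, hseen', List.map_map]
        apply List.map_congr_left
        intro k _
        by_cases h : (k == key) = true
        · have : k = key := by simpa using h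
          subst this
          simp [pvCount, Function.comp, hcnt]
        · have hne : ¬ (key == k) = true := by
            simp only [beq_iff_eq] at h ⊢; exact fun e => h e.symm
          simp [pvCount, Function.comp, h, hcnt, hne]
    · -- fresh key
      have hc' : st.1.contains key = false := by simpa using hc
      have hnmem : key ∉ pvSeen kd := by
        rw [← hkeys1, ← PySem.Dict.contains_iff_mem_keys]; simp [hc']
      have hseen' : pvSeen (kd ++ [(key, p.2)]) = pvSeen kd ++ [key] := by
        rw [pvSeen_append_singleton]; simp [hnmem]
      have hc2 : st.2.contains key = false := by
        rw [← Bool.not_eq_true, PySem.Dict.contains_iff_mem_keys, hkeys2]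
        exact hnmem
      have hempty : kd.filter (fun q => q.1 == key) = [] := by
        rw [List.filter_eq_nil_iff]
        intro q hq
        simp only [beq_iff_eq]
        intro e
        exact hnmem ((pvSeen_mem kd key).mpr (List.mem_map.mpr ⟨q, hq, e⟩))
      have hcnt0 : kd.countP (fun q => q.1 == key) = 0 := by
        rw [List.countP_eq_length_filter, hempty]; rfl
      have hstep : pvStepA st p
          = (st.1.insert key [p.2], st.2.insert key 1) := by
        simp only [pvStepA, ← hkey, hc', Bool.false_eq_true, if_false]
        congr 1
        simp [PySem.Dict.modify, PySem.Dict.getD_insert_self, PySem.Dict.insert_insert_self]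
      rw [hfold, hstep, hmapkd]
      constructor
      · rw [PySem.Dict.items_insert_of_not_contains _ _ hc', ih1, hseen',
          List.map_append]
        congr 1
        · apply List.map_congr_left
          intro k hk
          have hne : ¬ (key == k) = true := by
            simp only [beq_iff_eq]; intro e; subst e; exact hnmem hk
          simp [pvGroup, hfilt, hne]
        · simp [pvGroup, hfilt, hempty]
      · rw [PySem.Dict.items_insert_of_not_contains _ _ hc2, ih2, hseen',
          List.map_append]
        congr 1
        · apply List.map_congr_left
          intro k hk
          have hne : ¬ (key == k) = true := by
            simp only [beq_iff_eq]; intro e; subst e; exact hnmem hk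
          simp [pvCount, hcnt, hne]
        · simp [pvCount, hcnt, hcnt0]

-- ===== VERDICT =====
set_option maxHeartbeats 1000000 in
theorem translate_paths_into_dict_list_spec : Claim_equal_translate_paths_into_dict_list := by
  intro raw_paths _
  unfold Spec_translate_paths_into_dict_list
  unfold translate_paths_into_dict_list translate_paths_into_dict_list_alt
  obtain ⟨h1, h2⟩ := pvLoopA raw_paths
  simp only []
  rw [h1, h2]
  exact Prod.ext rfl rfl
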